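-- pv_equiv track=rewrite | github.com/sueszli/vector-database-benchmark | dataset/python-mutated/ExpressionValidate.py | IsValidBareCString
-- ===== SOURCE A (Python) =====
-- def IsValidBareCString(String):
--     if False:
--         i = 10
--         return i + 15
--     EscapeList = ['n', 't', 'f', 'r', 'b', '0', '\\', '"']
--     PreChar = ''
--     LastChar = ''
--     for Char in String:
--         LastChar = Char
--         if PreChar == '\\':
--             if Char not in EscapeList:
--                 return False
--             if Char == '\\':
--                 PreChar = ''
--                 continue
--         else:
--             IntChar = ord(Char)
--             if IntChar != 32 and IntChar != 9 and (IntChar != 33) and (IntChar < 35 or IntChar > 126):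
--                 return False
--         PreChar = Char
--     if LastChar == '\\' and PreChar == LastChar:
--         return False
--     return True
-- ===== SOURCE B (Python) =====
-- def IsValidBareCString(String):
--     escapes = ('n', 't', 'f', 'r', 'b', '0', '\\', '"')
--     i = 0
--     n = len(String)
--     while i < n:
--         c = String[i]
--         if c == '\\':
--             if i + 1 >= n or String[i + 1] not in escapes:
--                 return False
--             i += 2
--         else:
--             o = ord(c)
--             if not (o == 32 or o == 9 or o == 33 or 35 <= o <= 126):
--                 return False
--             i += 1
--     return True
-- ===== Notes on version B (the rewrite author's own statement) =====
-- stated objective: idiomatic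
-- what changed: Replaced the lookbehind PreChar/LastChar state machine (with its end-of-string dangling-backslash postcheck) by an index-based lookahead parser that consumes a backslash together with its escape character in one step (i += 2) and needs no carried state.
import Mathlib
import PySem

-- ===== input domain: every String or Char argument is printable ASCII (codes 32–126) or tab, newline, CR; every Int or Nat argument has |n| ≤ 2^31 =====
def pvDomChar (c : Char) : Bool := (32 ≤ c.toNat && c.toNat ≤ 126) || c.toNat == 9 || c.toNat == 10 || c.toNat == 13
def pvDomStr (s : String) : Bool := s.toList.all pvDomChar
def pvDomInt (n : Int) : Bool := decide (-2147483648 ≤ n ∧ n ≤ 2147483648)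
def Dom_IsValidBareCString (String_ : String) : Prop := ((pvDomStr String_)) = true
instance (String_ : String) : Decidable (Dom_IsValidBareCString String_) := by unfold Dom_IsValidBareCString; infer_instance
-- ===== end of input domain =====

-- B replaces A's lookbehind PreChar/LastChar state machine by a stateless lookahead
-- parser consuming '\' together with its escape char in one step (objective: idiomatic).

-- ===== PORT A =====
-- A's EscapeList
def pvEscapeList : List Char := ['n', 't', 'f', 'r', 'b', '0', '\\', '"']

-- A's for-loop, step for step; Python's empty-string PreChar/LastChar are Option Char
-- (none = ''). On [] it performs A's final check `LastChar == '\\' and PreChar == LastChar`.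
def pvGoA : List Char → Option Char → Option Char → Bool
  | [], pre, last => !(last == some '\\' && pre == last)
  | c :: rest, pre, _last =>
    let last := some c
    if pre == some '\\' then
      if !(pvEscapeList.contains c) then false
      else if c == '\\' then pvGoA rest none last
      else pvGoA rest (some c) last
    else
      let intChar := c.toNat
      if intChar ≠ 32 && intChar ≠ 9 && intChar ≠ 33 && (intChar < 35 || intChar > 126) then false
      else pvGoA rest (some c) last

def IsValidBareCString (String_ : String) : Bool :=
  pvGoA String_.toList none none

-- ===== PORT B =====
-- B's while loop over index i, transcribed as recursion on the characters not yet
-- consumed: a step consumes one char (i += 1) or a backslash plus its escape (i += 2).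
def pvGoB : List Char → Bool
  | [] => true
  | '\\' :: rest =>
    match rest with
    | [] => false
    | c :: rest' => pvEscapeList.contains c && pvGoB rest'
  | c :: rest =>
    let o := c.toNat
    (o == 32 || o == 9 || o == 33 || (35 ≤ o && o ≤ 126)) && pvGoB rest

def IsValidBareCString_alt (String_ : String) : Bool :=
  pvGoB String_.toList

-- ===== PRECONDITION & SPEC =====
def Spec_IsValidBareCString (String_ : String) (out : Bool) : Prop := out = IsValidBareCString_alt String_
instance (String_ : String) (out : Bool) : Decidable (Spec_IsValidBareCString String_ out) := by unfold Spec_IsValidBareCString; infer_instance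

-- ===== CLAIM (what is proved, stated in full; the proofs are below) =====
def Claim_equal_IsValidBareCString : Prop := ∀ (String_ : String), Dom_IsValidBareCString String_ → Spec_IsValidBareCString String_ (IsValidBareCString String_)

-- ===== LEMMAS AND PROOFS =====

-- From any state whose PreChar is not a pending backslash, A's state machine agrees
-- with B's lookahead parser on the remaining characters.
theorem pvGoA_eq_pvGoB : ∀ (cs : List Char) (pre last : Option Char),
    pre ≠ some '\\' → pvGoA cs pre last = pvGoB cs
  | [], pre, last, h => by
    have : (pre == some '\\') = false := by
      cases pre with
      | none => rfl
      | some p => simpa using fun hp => h (by simp [hp])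
    cases last with
    | none => simp [pvGoA, pvGoB]
    | some l =>
      by_cases hl : l = '\\'
      · subst hl
        simp [pvGoA, pvGoB]
        intro hpre
        exact h (by simp [hpre])
      · simp [pvGoA, pvGoB, hl]
  | c :: rest, pre, last, h => by
    have hpre : (pre == some '\\') = false := by
      cases pre with
      | none => rfl
      | some p => simpa using fun hp => h (by simp [hp])
    by_cases hb : c = '\\'
    · subst hb
      -- printable check on '\' (code 92) passes; A enters the pending-backslash state
      have : pvGoA ('\\' :: rest) pre last = pvGoA rest (some '\\') (some '\\') := by
        simp [pvGoA, hpre]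
      rw [this]
      match rest with
      | [] => simp [pvGoA, pvGoB]
      | c' :: rest' =>
        by_cases hesc : pvEscapeList.contains c'
        · by_cases hcb : c' = '\\'
          · subst hcb
            have ih := pvGoA_eq_pvGoB rest' none (some '\\') (by simp)
            simp [pvGoA, pvGoB, pvEscapeList, ih]
          · have ih := pvGoA_eq_pvGoB rest' (some c') (some c') (by simpa using hcb)
            simp [pvGoA, pvGoB, hesc, hcb, ih]
        · have he : c' ∉ pvEscapeList := by simpa using hesc
          simp [pvGoA, pvGoB, he]
    · by_cases hP : (c.toNat = 32 ∨ c.toNat = 9 ∨ c.toNat = 33 ∨ (35 ≤ c.toNat ∧ c.toNat ≤ 126))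
      · have hfail : (c.toNat ≠ 32 && c.toNat ≠ 9 && c.toNat ≠ 33 && (c.toNat < 35 || c.toNat > 126)) = false := by
          simp; omega
        have hprint : (c.toNat == 32 || c.toNat == 9 || c.toNat == 33 || (35 ≤ c.toNat && c.toNat ≤ 126)) = true := by
          simp; omega
        have ih := pvGoA_eq_pvGoB rest (some c) (some c) (by simpa using hb)
        simp [pvGoA, pvGoB, hpre, hfail, hb, hprint, ih]
        intro _; tauto
      · have hfail : (c.toNat ≠ 32 && c.toNat ≠ 9 && c.toNat ≠ 33 && (c.toNat < 35 || c.toNat > 126)) = true := by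
          simp; omega
        have hprint : (c.toNat == 32 || c.toNat == 9 || c.toNat == 33 || (35 ≤ c.toNat && c.toNat ≤ 126)) = false := by
          simp; omega
        simp [pvGoA, pvGoB, hpre, hfail, hb, hprint]
        exact fun hx => absurd (by tauto) hP
termination_by cs _ _ _ => cs.length

-- ===== VERDICT (by name: the statement is the Claim_ definition above) =====
theorem IsValidBareCString_spec : Claim_equal_IsValidBareCString := by
  intro s _
  unfold Spec_IsValidBareCString IsValidBareCString IsValidBareCString_alt
  exact pvGoA_eq_pvGoB s.toList none none (by simp)
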